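-- pv_equiv track=rewrite | github.com/shuaitq/cs61a-su19 | lab/lab03/lab03_extra.py | ten_pairs_helper
-- ===== SOURCE A (Python) =====
-- def ten_pairs_helper(n, count):
--     if n == 0:
--         return 0
--     else:
--         digit = n % 10
--         tmp = 0
--         if digit != 0:
--             tmp = count[10 - digit]
--
--         count[digit] += 1
--
--         return ten_pairs_helper(n // 10, count) + tmp
-- ===== SOURCE B (Python) =====
-- def ten_pairs_helper(n, count):
--     total = 0
--     while n:
--         digit = n % 10
--         if digit != 0:
--             total += count[10 - digit]
--         count[digit] += 1
--         n //= 10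
--     return total
-- ===== Notes on version B (the rewrite author's own statement) =====
-- stated objective: simpler
-- what changed: The recursion on n is replaced by a flat iterative while-loop with a running total accumulator, keeping the same least-significant-first digit order and read-before-increment on count.
-- outside the precondition, e.g. on ten_pairs_helper(5, [0, 0, 0, 0, 0, 0]): A returns 0, B returns 0
import Mathlib
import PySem

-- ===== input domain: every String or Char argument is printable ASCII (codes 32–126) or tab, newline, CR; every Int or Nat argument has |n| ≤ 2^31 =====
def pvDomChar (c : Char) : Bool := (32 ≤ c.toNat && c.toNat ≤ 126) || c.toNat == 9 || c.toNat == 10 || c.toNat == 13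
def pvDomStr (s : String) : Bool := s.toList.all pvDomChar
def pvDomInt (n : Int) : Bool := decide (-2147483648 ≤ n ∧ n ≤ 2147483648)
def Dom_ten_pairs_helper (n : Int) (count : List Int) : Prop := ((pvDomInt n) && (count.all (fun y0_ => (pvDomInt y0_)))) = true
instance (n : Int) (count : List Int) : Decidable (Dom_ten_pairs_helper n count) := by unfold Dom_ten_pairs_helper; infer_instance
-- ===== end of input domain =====

-- B replaces A's recursion by an iterative accumulator loop (simpler, constant stack).
-- Both Pythons mutate `count` in place identically; the equivalence proved here is about the return value.

-- ===== PORT A =====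
-- Literal port of A's recursion. The `n < 0` branch is a totality guard only: Python A
-- recurses forever (RecursionError) on negative n, which Pre_ excludes.
def ten_pairs_helper (n : Int) (count : List Int) : Int :=
  if n = 0 then 0
  else if n < 0 then 0
  else
    let digit := PySem.Int.mod n 10
    let tmp := if digit ≠ 0 then PySem.List.pyGetD count (10 - digit) 0 else 0
    let count' := PySem.List.pySetD count digit (PySem.List.pyGetD count digit 0 + 1)
    ten_pairs_helper (PySem.Int.floordiv n 10) count' + tmp
termination_by n.toNat
decreasing_by
  rename_i h0 hneg
  rw [PySem.Int.floordiv_eq_ediv_of_pos (by norm_num : (0:Int) < 10)]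
  omega

-- ===== PORT B =====
-- The `while n:` loop of Source B; `n ≤ 0` is the loop exit plus a totality guard
-- (Python B loops forever on negative n, which Pre_ excludes).
def tenPairsLoop (n : Int) (count : List Int) (total : Int) : Int :=
  if n ≤ 0 then total
  else
    let digit := PySem.Int.mod n 10
    let total' := if digit ≠ 0 then total + PySem.List.pyGetD count (10 - digit) 0 else total
    let count' := PySem.List.pySetD count digit (PySem.List.pyGetD count digit 0 + 1)
    tenPairsLoop (PySem.Int.floordiv n 10) count' total'
termination_by n.toNat
decreasing_by
  rename_i hpos
  rw [PySem.Int.floordiv_eq_ediv_of_pos (by norm_num : (0:Int) < 10)]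
  omega

def ten_pairs_helper_alt (n : Int) (count : List Int) : Int :=
  tenPairsLoop n count 0

-- ===== PRECONDITION & SPEC =====
-- Pre_ excludes negative n (A raises RecursionError there) and, for n > 0, requires
-- len(count) ≥ 10 so every index count[digit] / count[10-digit] is in range; this slightly
-- over-excludes n > 0 whose digits are all small enough for a shorter count, inputs on
-- which A returns and B agrees (see the cite in the claim).
def Pre_ten_pairs_helper (n : Int) (count : List Int) : Prop :=
  0 ≤ n ∧ (n = 0 ∨ 10 ≤ count.length)
instance (n : Int) (count : List Int) : Decidable (Pre_ten_pairs_helper n count) := by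
  unfold Pre_ten_pairs_helper; infer_instance

def pvWitness_ten_pairs_helper : Int × List Int := (6464, [0, 0, 0, 0, 0, 0, 0, 0, 0, 0])

def Spec_ten_pairs_helper (n : Int) (count : List Int) (out : Int) : Prop :=
  out = ten_pairs_helper_alt n count
instance (n : Int) (count : List Int) (out : Int) : Decidable (Spec_ten_pairs_helper n count out) := by
  unfold Spec_ten_pairs_helper; infer_instance

-- ===== CLAIM (what is proved, stated in full; the proofs are below) =====
def Claim_equal_ten_pairs_helper : Prop := ∀ (n : Int) (count : List Int), Dom_ten_pairs_helper n count → Pre_ten_pairs_helper n count → Spec_ten_pairs_helper n count (ten_pairs_helper n count)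

-- ===== LEMMAS AND PROOFS =====
-- Loop invariant: the accumulator loop computes total + A's recursive value (for every input).
theorem tenPairsLoop_eq (n : Int) (count : List Int) (total : Int) :
    tenPairsLoop n count total = total + ten_pairs_helper n count := by
  induction n, count, total using tenPairsLoop.induct with
  | case1 n count total hle =>
    rw [tenPairsLoop, if_pos hle, ten_pairs_helper]
    rcases eq_or_lt_of_le hle with h | h
    · simp [h.symm]
    · simp [h]
  | case2 n count total hpos digit total' count' ih =>
    rw [tenPairsLoop, if_neg hpos, ten_pairs_helper,
        if_neg (by omega : ¬ n = 0), if_neg (by omega : ¬ n < 0)]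
    simp only [digit, total', count', dite_eq_ite] at ih
    dsimp only
    rw [ih]
    split_ifs <;> ring

-- ===== VERDICT (by name: the statement is the Claim_ definition above) =====
theorem ten_pairs_helper_spec : Claim_equal_ten_pairs_helper := by
  intro n count _ _
  unfold Spec_ten_pairs_helper ten_pairs_helper_alt
  rw [tenPairsLoop_eq, zero_add]
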